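-- pv_equiv track=rewrite | github.com/unit0113/projects | Courses/OCW/MIT_6_006/ps2/satisfying_booking.py | satisfying_booking
-- ===== SOURCE A (Python) =====
-- def merge_bookings(B1, B2):
--     n1, n2, i1, i2 = len(B1), len(B2), 0, 0
--     x = 0
--     B = []
--
--     while i1 + i2 < n1 + n2:
--         if i1 < n1:
--             k1, s1, t1 = B1[i1]
--         if i2 < n2:
--             k2, s2, t2 = B2[i2]
--
--         if i2 == n2:
--             k, s, x = k1, max(x, s1), t1
--             i1 += 1
--         elif i1 == n1:
--             k, s, x = k2, max(x, s2), t2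
--             i2 += 1
--
--         else:
--             if x < min(s1, s2):
--                 x = min(s1, s2)
--
--             if t1 <= s2:
--                 k, s, x = k1, x, t1
--                 i1 += 1
--             elif t2 <= s1:
--                 k, s, x = k2, x, t2
--                 i2 += 1
--             elif x < s2:
--                 k, s, x = k1, x, s2
--             elif x < s1:
--                 k, s, x = k2, x, s1
--             else:
--                 k, s, x = k1 + k2, x, min(t1, t2)
--                 if t1 == x: i1 += 1
--                 if t2 == x: i2 += 1
--
--         B.append((k, s, x))
--
--     B_ = [B[0]]
--     for k, s, t in B[1:]:
--         k_, s_, t_ = B_[-1]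
--         if k == k_ and t_ == s:
--             B_.pop()
--             s = s_
--         B_.append((k, s, t))
--
--     return B_
--
-- def satisfying_booking(R):
--     '''
--     Input:  R | Tuple of |R| talk request tuples (s, t)
--     Output: B | Tuple of room booking triples (k, s, t)
--               | that is the booking schedule that satisfies R
--     '''
--     if len(R) == 1:
--         s, t = R[0]
--         return ((1, s, t),)
--
--     m = len(R) // 2
--     R1, R2 = R[:m], R[m:]
--     B1 = satisfying_booking(R1)
--     B2 = satisfying_booking(R2)
--     B = merge_bookings(B1, B2)
--
--     return tuple(B)
-- ===== SOURCE B (Python) =====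
-- def satisfying_booking(R):
--     '''
--     Input:  R | Tuple of |R| talk request tuples (s, t)
--     Output: B | Tuple of room booking triples (k, s, t)
--               | that is the booking schedule that satisfies R
--     '''
--     if not R:
--         return ()
--
--     def push(out, k, s, t):
--         # append (k, s, t), fusing with the last segment when contiguous and equal-count
--         if out and out[-1][0] == k and out[-1][2] == s:
--             out[-1] = (k, out[-1][1], t)
--         else:
--             out.append((k, s, t))
--
--     def merge2(B1, B2):
--         # consume both schedules front-to-back via reversed stacks, compacting as we go
--         L1, L2 = B1[::-1], B2[::-1]
--         out = []
--         x = 0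
--         while L1 or L2:
--             if not L2:
--                 k, s, t = L1.pop()
--                 push(out, k, max(x, s), t)
--                 x = t
--             elif not L1:
--                 k, s, t = L2.pop()
--                 push(out, k, max(x, s), t)
--                 x = t
--             else:
--                 k1, s1, t1 = L1[-1]
--                 k2, s2, t2 = L2[-1]
--                 x = max(x, min(s1, s2))
--                 if t1 <= s2:
--                     L1.pop()
--                     push(out, k1, x, t1)
--                     x = t1
--                 elif t2 <= s1:
--                     L2.pop()
--                     push(out, k2, x, t2)
--                     x = t2
--                 elif x < s2:
--                     push(out, k1, x, s2)
--                     x = s2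
--                 elif x < s1:
--                     push(out, k2, x, s1)
--                     x = s1
--                 else:
--                     t = min(t1, t2)
--                     push(out, k1 + k2, x, t)
--                     if t1 == t:
--                         L1.pop()
--                     if t2 == t:
--                         L2.pop()
--                     x = t
--         return out
--
--     # explicit post-order stack machine over the implicit halving tree (no recursion, no slicing)
--     stack = [(0, len(R), False)]
--     vals = []
--     while stack:
--         lo, hi, ready = stack.pop()
--         if ready:
--             b2 = vals.pop()
--             b1 = vals.pop()
--             vals.append(merge2(b1, b2))
--         elif hi - lo == 1:
--             vals.append([(1, R[lo][0], R[lo][1])])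
--         else:
--             mid = (lo + hi) // 2
--             stack.append((lo, hi, True))
--             stack.append((mid, hi, False))
--             stack.append((lo, mid, False))
--     return tuple(vals[-1])
-- ===== Notes on version B (the rewrite author's own statement) =====
-- stated objective: alternative
-- what changed: Same divide-and-conquer profile semantics, re-decomposed: the recursion with tuple slicing becomes an explicit post-order stack machine over index ranges, and merge_bookings' two-index while loop plus separate compaction pass becomes a single loop that pops reversed schedule stacks and compacts on the fly with a fusing push; Pre_ excludes only the empty tuple, on which A recurses forever.
-- outside the precondition, e.g. on satisfying_booking(()): A raises RecursionError, B returns ()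
import Mathlib
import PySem

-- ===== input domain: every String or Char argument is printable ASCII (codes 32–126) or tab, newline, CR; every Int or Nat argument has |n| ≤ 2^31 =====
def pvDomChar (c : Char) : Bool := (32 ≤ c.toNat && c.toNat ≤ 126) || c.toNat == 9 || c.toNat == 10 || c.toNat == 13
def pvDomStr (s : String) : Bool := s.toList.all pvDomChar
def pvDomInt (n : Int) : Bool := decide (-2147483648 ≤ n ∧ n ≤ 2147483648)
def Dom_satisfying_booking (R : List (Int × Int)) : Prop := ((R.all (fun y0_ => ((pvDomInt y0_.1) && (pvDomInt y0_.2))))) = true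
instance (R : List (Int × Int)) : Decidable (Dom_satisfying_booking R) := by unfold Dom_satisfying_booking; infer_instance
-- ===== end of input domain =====

-- B re-decomposes A's divide-and-conquer: an explicit post-order stack machine replaces the
-- recursion-with-slicing, and the merge consumes reversed stacks with an on-the-fly compacting
-- push instead of A's two-index loop followed by a separate compaction pass (objective: alternative).

-- ===== PORT A =====
-- B[i] read under Python's in-range guards (where it cannot raise)
def pvGetSeg (B : List (Int × Int × Int)) (i : Nat) : Int × Int × Int := B.getD i (0, 0, 0)

-- the 'while i1 + i2 < n1 + n2' loop of merge_bookings, returning the appended segments;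
-- fuel 3*(n1+n2)+1 covers every run (between two index increments at most two non-consuming
-- iterations, the 'elif x < s2' / 'elif x < s1' partial emissions, can occur)
def pvMergeLoopA (B1 B2 : List (Int × Int × Int)) : Nat → Nat → Nat → Int → List (Int × Int × Int)
  | 0, _, _, _ => []
  | fuel+1, i1, i2, x =>
    if i1 + i2 < B1.length + B2.length then
      if i2 = B2.length then
        let (k1, s1, t1) := pvGetSeg B1 i1
        (k1, max x s1, t1) :: pvMergeLoopA B1 B2 fuel (i1+1) i2 t1
      else if i1 = B1.length then
        let (k2, s2, t2) := pvGetSeg B2 i2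
        (k2, max x s2, t2) :: pvMergeLoopA B1 B2 fuel i1 (i2+1) t2
      else
        let (k1, s1, t1) := pvGetSeg B1 i1
        let (k2, s2, t2) := pvGetSeg B2 i2
        let x' := if x < min s1 s2 then min s1 s2 else x
        if t1 ≤ s2 then (k1, x', t1) :: pvMergeLoopA B1 B2 fuel (i1+1) i2 t1
        else if t2 ≤ s1 then (k2, x', t2) :: pvMergeLoopA B1 B2 fuel i1 (i2+1) t2
        else if x' < s2 then (k1, x', s2) :: pvMergeLoopA B1 B2 fuel i1 i2 s2
        else if x' < s1 then (k2, x', s1) :: pvMergeLoopA B1 B2 fuel i1 i2 s1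
        else
          let t := min t1 t2
          (k1 + k2, x', t) :: pvMergeLoopA B1 B2 fuel
            (if t1 = t then i1+1 else i1) (if t2 = t then i2+1 else i2) t
    else []

-- body of the compaction 'for k, s, t in B[1:]' loop
def pvCompactStep (B_ : List (Int × Int × Int)) (seg : Int × Int × Int) : List (Int × Int × Int) :=
  match B_.getLast? with
  | some (k_, s_, t_) =>
    if seg.1 = k_ ∧ t_ = seg.2.1 then B_.dropLast ++ [(seg.1, s_, seg.2.2)] else B_ ++ [seg]
  | none => B_ ++ [seg]

def pvMergeA (B1 B2 : List (Int × Int × Int)) : List (Int × Int × Int) :=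
  match pvMergeLoopA B1 B2 (3 * (B1.length + B2.length) + 1) 0 0 0 with
  | [] => []  -- unreachable from satisfying_booking (Python's B[0] would raise only on two empty inputs)
  | b0 :: rest => rest.foldl pvCompactStep [b0]

-- the recursion of satisfying_booking; fuel R.length + 1 suffices (each half is strictly shorter);
-- on R = [] Python recurses forever (RecursionError) — excluded by Pre_
def pvSbA : Nat → List (Int × Int) → List (Int × Int × Int)
  | 0, _ => []
  | fuel+1, R =>
    if R.length = 1 then
      let st := R.getD 0 (0, 0)
      [(1, st.1, st.2)]
    else
      let m := R.length / 2
      pvMergeA (pvSbA fuel (R.take m)) (pvSbA fuel (R.drop m))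

def satisfying_booking (R : List (Int × Int)) : List (Int × Int × Int) :=
  pvSbA (R.length + 1) R

-- ===== PORT B =====
-- push(out, k, s, t): append, fusing with a contiguous equal-count last segment
def pvPush (out : List (Int × Int × Int)) (k s t : Int) : List (Int × Int × Int) :=
  match out.getLast? with
  | some (k_, s_, t_) => if k_ = k ∧ t_ = s then out.dropLast ++ [(k, s_, t)] else out ++ [(k, s, t)]
  | none => [(k, s, t)]

-- the 'while L1 or L2' loop of merge2 (L1, L2 are the reversed schedules, popped from the end)
def pvMerge2Loop : Nat → List (Int × Int × Int) → List (Int × Int × Int) →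
    List (Int × Int × Int) → Int → List (Int × Int × Int)
  | 0, _, _, out, _ => out
  | fuel+1, L1, L2, out, x =>
    if L1 = [] ∧ L2 = [] then out
    else if L2 = [] then
      match L1.getLast? with
      | some (k, s, t) => pvMerge2Loop fuel L1.dropLast L2 (pvPush out k (max x s) t) t
      | none => out  -- unreachable: L1 ≠ []
    else if L1 = [] then
      match L2.getLast? with
      | some (k, s, t) => pvMerge2Loop fuel L1 L2.dropLast (pvPush out k (max x s) t) t
      | none => out  -- unreachable: L2 ≠ []
    else
      match L1.getLast?, L2.getLast? with
      | some (k1, s1, t1), some (k2, s2, t2) =>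
        let x' := max x (min s1 s2)
        if t1 ≤ s2 then pvMerge2Loop fuel L1.dropLast L2 (pvPush out k1 x' t1) t1
        else if t2 ≤ s1 then pvMerge2Loop fuel L1 L2.dropLast (pvPush out k2 x' t2) t2
        else if x' < s2 then pvMerge2Loop fuel L1 L2 (pvPush out k1 x' s2) s2
        else if x' < s1 then pvMerge2Loop fuel L1 L2 (pvPush out k2 x' s1) s1
        else
          let t := min t1 t2
          pvMerge2Loop fuel (if t1 = t then L1.dropLast else L1) (if t2 = t then L2.dropLast else L2)
            (pvPush out (k1 + k2) x' t) t
      | _, _ => out  -- unreachable: both ≠ []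
  termination_by fuel => fuel

def pvMerge2 (B1 B2 : List (Int × Int × Int)) : List (Int × Int × Int) :=
  pvMerge2Loop (3 * (B1.length + B2.length) + 1) B1.reverse B2.reverse [] 0

-- the 'while stack' machine (stack and vals are Python lists used as stacks: head = top)
def pvSbLoop (R : List (Int × Int)) : Nat → List (Nat × Nat × Bool) →
    List (List (Int × Int × Int)) → List (List (Int × Int × Int))
  | 0, _, vals => vals
  | fuel+1, stack, vals =>
    match stack with
    | [] => vals
    | (lo, hi, ready) :: rest =>
      if ready then
        match vals with
        | b2 :: b1 :: vrest => pvSbLoop R fuel rest (pvMerge2 b1 b2 :: vrest)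
        | _ => vals  -- unreachable: two results are always available
      else if hi - lo = 1 then
        let st := R.getD lo (0, 0)
        pvSbLoop R fuel rest ([(1, st.1, st.2)] :: vals)
      else
        let mid := (lo + hi) / 2
        pvSbLoop R fuel ((lo, mid, false) :: (mid, hi, false) :: (lo, hi, true) :: rest) vals

def satisfying_booking_alt (R : List (Int × Int)) : List (Int × Int × Int) :=
  if R = [] then []
  else
    match pvSbLoop R (3 * R.length + 3) [(0, R.length, false)] [] with
    | v :: _ => v
    | [] => []  -- unreachable: exactly one result remains

-- ===== PRECONDITION & SPEC =====
-- Pre_ excludes only R = [], on which Python A recurses forever (RecursionError)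
def Pre_satisfying_booking (R : List (Int × Int)) : Prop := R ≠ []
instance (R : List (Int × Int)) : Decidable (Pre_satisfying_booking R) := by
  unfold Pre_satisfying_booking; infer_instance

def pvWitness_satisfying_booking : (List (Int × Int)) := [(0, 2), (1, 3)]

def Spec_satisfying_booking (R : List (Int × Int)) (out : List (Int × Int × Int)) : Prop :=
  out = satisfying_booking_alt R
instance (R : List (Int × Int)) (out : List (Int × Int × Int)) : Decidable (Spec_satisfying_booking R out) := by
  unfold Spec_satisfying_booking; infer_instance

-- ===== CLAIM (what is proved, stated in full; the proofs are below) =====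
def Claim_equal_satisfying_booking : Prop := ∀ (R : List (Int × Int)), Dom_satisfying_booking R →
  Pre_satisfying_booking R → Spec_satisfying_booking R (satisfying_booking R)

-- ===== LEMMAS AND PROOFS =====

theorem pvCompactStep_eq_push (B_ : List (Int × Int × Int)) (seg : Int × Int × Int) :
    pvCompactStep B_ seg = pvPush B_ seg.1 seg.2.1 seg.2.2 := by
  obtain ⟨k, s, t⟩ := seg
  unfold pvCompactStep pvPush
  cases h : B_.getLast? with
  | none => simp_all [List.getLast?_eq_none_iff]
  | some l =>
    obtain ⟨k_, s_, t_⟩ := l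
    simp only
    by_cases hk : k = k_ <;> by_cases ht : t_ = s <;> simp_all [eq_comm]

theorem pvMergeLoop_eq (B1 B2 : List (Int × Int × Int)) :
    ∀ (fuel i1 i2 : Nat) (x : Int) (out : List (Int × Int × Int)),
      i1 ≤ B1.length → i2 ≤ B2.length →
      pvMerge2Loop fuel ((B1.drop i1).reverse) ((B2.drop i2).reverse) out x
        = List.foldl pvCompactStep out (pvMergeLoopA B1 B2 fuel i1 i2 x) := by
  intro fuel
  induction fuel with
  | zero => intro i1 i2 x out h1 h2; simp [pvMerge2Loop, pvMergeLoopA]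
  | succ fuel ih =>
    intro i1 i2 x out h1 h2
    have e1 : ((B1.drop i1).reverse = []) ↔ (B1.length ≤ i1) := by simp
    have e2 : ((B2.drop i2).reverse = []) ↔ (B2.length ≤ i2) := by simp
    by_cases hc : i1 + i2 < B1.length + B2.length
    · by_cases hB2 : i2 = B2.length
      · -- one-sided: only B1 remains
        have hi1 : i1 < B1.length := by omega
        rcases hp1 : pvGetSeg B1 i1 with ⟨k1, s1, t1⟩
        have hL1last : (B1.drop i1).reverse.getLast? = some (k1, s1, t1) := by
          rw [List.getLast?_reverse, List.head?_drop, List.getElem?_eq_getElem hi1, ← hp1]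
          unfold pvGetSeg; rw [List.getD_eq_getElem _ _ hi1]
        have hL2e : (B2.drop i2).reverse = [] := by rw [e2]; omega
        have hdl : (B1.drop i1).reverse.dropLast = (B1.drop (i1+1)).reverse := by
          rw [List.dropLast_reverse, List.tail_drop]
        have hL1ne : ¬ ((B1.drop i1).reverse = [] ∧ (B2.drop i2).reverse = []) := by
          rw [e1, e2]; omega
        simp only [pvMerge2Loop, pvMergeLoopA, if_pos hc, if_pos hB2, hp1, hL2e, hL1last, List.foldl_cons]
        have hne : ¬ (B1.drop i1).reverse = [] := by rw [e1]; omega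
        simp only [and_true, if_neg hne, if_true, hdl, pvCompactStep_eq_push]
        simpa [hL2e] using ih (i1+1) i2 t1 (pvPush out k1 (max x s1) t1) (by omega) h2
      · by_cases hB1 : i1 = B1.length
        · -- one-sided: only B2 remains
          have hi2 : i2 < B2.length := by omega
          rcases hp2 : pvGetSeg B2 i2 with ⟨k2, s2, t2⟩
          have hL2last : (B2.drop i2).reverse.getLast? = some (k2, s2, t2) := by
            rw [List.getLast?_reverse, List.head?_drop, List.getElem?_eq_getElem hi2, ← hp2]
            unfold pvGetSeg; rw [List.getD_eq_getElem _ _ hi2]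
          have hL1e : (B1.drop i1).reverse = [] := by rw [e1]; omega
          have hne2 : ¬ (B2.drop i2).reverse = [] := by rw [e2]; omega
          have hdl2 : (B2.drop i2).reverse.dropLast = (B2.drop (i2+1)).reverse := by
            rw [List.dropLast_reverse, List.tail_drop]
          simp only [pvMerge2Loop, pvMergeLoopA, if_pos hc, if_neg hB2, if_pos hB1, hp2,
            hL1e, hL2last, List.foldl_cons]
          simp only [true_and, if_neg hne2, if_true, hdl2, pvCompactStep_eq_push]
          simpa [hL1e] using ih i1 (i2+1) t2 (pvPush out k2 (max x s2) t2) h1 (by omega)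
        · -- both sides present
          have hi1 : i1 < B1.length := by omega
          have hi2 : i2 < B2.length := by omega
          rcases hp1 : pvGetSeg B1 i1 with ⟨k1, s1, t1⟩
          rcases hp2 : pvGetSeg B2 i2 with ⟨k2, s2, t2⟩
          have hL1last : (B1.drop i1).reverse.getLast? = some (k1, s1, t1) := by
            rw [List.getLast?_reverse, List.head?_drop, List.getElem?_eq_getElem hi1, ← hp1]
            unfold pvGetSeg; rw [List.getD_eq_getElem _ _ hi1]
          have hL2last : (B2.drop i2).reverse.getLast? = some (k2, s2, t2) := by
            rw [List.getLast?_reverse, List.head?_drop, List.getElem?_eq_getElem hi2, ← hp2]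
            unfold pvGetSeg; rw [List.getD_eq_getElem _ _ hi2]
          have hne1 : ¬ (B1.drop i1).reverse = [] := by rw [e1]; omega
          have hne2 : ¬ (B2.drop i2).reverse = [] := by rw [e2]; omega
          have hdl1 : (B1.drop i1).reverse.dropLast = (B1.drop (i1+1)).reverse := by
            rw [List.dropLast_reverse, List.tail_drop]
          have hdl2 : (B2.drop i2).reverse.dropLast = (B2.drop (i2+1)).reverse := by
            rw [List.dropLast_reverse, List.tail_drop]
          have hx : (if x < min s1 s2 then min s1 s2 else x) = max x (min s1 s2) := by
            rw [max_def]; split_ifs <;> omega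
          have hne : ¬ ((B1.drop i1).reverse = [] ∧ (B2.drop i2).reverse = []) := by
            rw [e1, e2]; omega
          simp only [pvMerge2Loop, pvMergeLoopA, if_pos hc, if_neg hB2, if_neg hB1, hp1, hp2,
            hL1last, hL2last, if_neg hne, if_neg hne2, if_neg hne1, hx]
          split_ifs with ht1 ht2 hxs2 hxs1
          · simp only [List.foldl_cons, pvCompactStep_eq_push, hdl1]
            exact ih (i1+1) i2 t1 _ (by omega) h2
          · simp only [List.foldl_cons, pvCompactStep_eq_push, hdl2]
            exact ih i1 (i2+1) t2 _ h1 (by omega)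
          · simp only [List.foldl_cons, pvCompactStep_eq_push]
            exact ih i1 i2 s2 _ h1 h2
          · simp only [List.foldl_cons, pvCompactStep_eq_push]
            exact ih i1 i2 s1 _ h1 h2
          all_goals simp only [List.foldl_cons, pvCompactStep_eq_push, hdl1, hdl2]
          all_goals exact ih _ _ _ _ (by omega) (by omega)
    · -- loop ends
      have h1' : B1.length ≤ i1 := by omega
      have h2' : B2.length ≤ i2 := by omega
      simp only [pvMerge2Loop, pvMergeLoopA, if_neg hc]
      rw [if_pos ⟨e1.2 h1', e2.2 h2'⟩]
      simp

theorem pvMerge_eq (B1 B2 : List (Int × Int × Int)) : pvMergeA B1 B2 = pvMerge2 B1 B2 := by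
  unfold pvMergeA pvMerge2
  have h := pvMergeLoop_eq B1 B2 (3 * (B1.length + B2.length) + 1) 0 0 0 [] (by omega) (by omega)
  simp only [List.drop_zero] at h
  rw [h]
  cases hE : pvMergeLoopA B1 B2 (3 * (B1.length + B2.length) + 1) 0 0 0 with
  | nil => simp
  | cons b0 rest =>
    obtain ⟨k, s, t⟩ := b0
    simp [pvCompactStep]

def pvRef (R : List (Int × Int)) (lo hi : Nat) : List (Int × Int × Int) :=
  if hi - lo ≤ 1 then [(1, (R.getD lo (0, 0)).1, (R.getD lo (0, 0)).2)]
  else pvMerge2 (pvRef R lo ((lo + hi) / 2)) (pvRef R ((lo + hi) / 2) hi)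
  termination_by hi - lo
  decreasing_by all_goals omega

theorem pvSbA_eq_ref (R : List (Int × Int)) :
    ∀ (d lo hi : Nat), hi - lo = d → 1 ≤ d → hi ≤ R.length →
    ∀ f, d ≤ f → pvSbA f ((R.drop lo).take (hi - lo)) = pvRef R lo hi := by
  intro d
  induction d using Nat.strong_induction_on with
  | _ d IH =>
    intro lo hi hd h1 hhi f hf
    subst hd
    obtain ⟨f', rfl⟩ : ∃ f', f = f' + 1 := ⟨f - 1, by omega⟩
    have hlen : ((R.drop lo).take (hi - lo)).length = hi - lo := by
      simp [List.length_take, List.length_drop]; omega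
    simp only [pvSbA, hlen]
    by_cases hone : hi - lo = 1
    · rw [if_pos hone, pvRef, if_pos (by omega)]
      have hlo : lo < R.length := by omega
      simp [List.getD_eq_getElem?_getD, hone, hlo]
    · rw [if_neg hone]
      have hta : ((R.drop lo).take (hi - lo)).take ((hi - lo) / 2)
          = (R.drop lo).take ((lo + hi) / 2 - lo) := by
        rw [List.take_take]; congr 1; omega
      have hdr : ((R.drop lo).take (hi - lo)).drop ((hi - lo) / 2)
          = (R.drop ((lo + hi) / 2)).take (hi - (lo + hi) / 2) := by
        rw [List.drop_take, List.drop_drop,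
          show lo + (hi - lo) / 2 = (lo + hi) / 2 from by omega,
          show hi - lo - (hi - lo) / 2 = hi - (lo + hi) / 2 from by omega]
      rw [hta, hdr]
      rw [IH ((lo + hi) / 2 - lo) (by omega) lo ((lo + hi) / 2) rfl (by omega) (by omega) f' (by omega)]
      rw [IH (hi - (lo + hi) / 2) (by omega) ((lo + hi) / 2) hi rfl (by omega) (by omega) f' (by omega)]
      rw [pvMerge_eq]
      conv_rhs => rw [pvRef]
      rw [if_neg (by omega)]

theorem pvSbLoop_sim (R : List (Int × Int)) :
    ∀ (d lo hi : Nat), hi - lo = d → 1 ≤ d →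
    ∀ (f : Nat) (rest : List (Nat × Nat × Bool)) (vals : List (List (Int × Int × Int))),
      pvSbLoop R (3 * d - 2 + f) ((lo, hi, false) :: rest) vals
        = pvSbLoop R f rest (pvRef R lo hi :: vals) := by
  intro d
  induction d using Nat.strong_induction_on with
  | _ d IH =>
    intro lo hi hd h1 f rest vals
    subst hd
    by_cases hone : hi - lo = 1
    · have : 3 * (hi - lo) - 2 + f = f + 1 := by omega
      rw [this]
      simp only [pvSbLoop, Bool.false_eq_true, if_false, if_pos hone]
      rw [pvRef, if_pos (by omega)]
    · have h2 : 2 ≤ hi - lo := by omega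
      set mid := (lo + hi) / 2 with hmid
      have hd1 : 1 ≤ mid - lo := by omega
      have hd2 : 1 ≤ hi - mid := by omega
      obtain ⟨b, hb⟩ : ∃ b, b = 3 * (hi - mid) - 2 + (f + 1) := ⟨_, rfl⟩
      have hsum : 3 * (hi - lo) - 2 + f = (3 * (mid - lo) - 2 + b) + 1 := by omega
      rw [hsum]
      simp only [pvSbLoop, Bool.false_eq_true, if_false, if_neg hone]
      rw [← hmid]
      rw [IH (mid - lo) (by omega) lo mid rfl hd1]
      rw [hb]
      rw [IH (hi - mid) (by omega) mid hi rfl hd2]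
      simp only [pvSbLoop]
      rw [if_pos trivial]
      conv_rhs => rw [pvRef]
      rw [if_neg (by omega), ← hmid]

-- ===== VERDICT (by name: the statement is the Claim_ definition above) =====
theorem satisfying_booking_spec : Claim_equal_satisfying_booking := by
  unfold Claim_equal_satisfying_booking
  intro R _hdom hpre
  unfold Spec_satisfying_booking satisfying_booking satisfying_booking_alt
  have hn : 1 ≤ R.length := List.length_pos_of_ne_nil hpre
  rw [if_neg hpre]
  have hA : pvSbA (R.length + 1) R = pvRef R 0 R.length := by
    have h := pvSbA_eq_ref R R.length 0 R.length (by omega) (by omega) (le_refl _)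
      (R.length + 1) (by omega)
    simpa using h
  have hB : pvSbLoop R (3 * R.length + 3) [(0, R.length, false)] [] = [pvRef R 0 R.length] := by
    have h := pvSbLoop_sim R R.length 0 R.length (by omega) (by omega) 5 [] []
    rw [show 3 * R.length - 2 + 5 = 3 * R.length + 3 from by omega] at h
    rw [h]
    simp [pvSbLoop]
  rw [hA, hB]
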